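-- pv_equiv track=rewrite | github.com/apurvjha123/sonarqube | good_code.py | do_stuff
-- ===== SOURCE A (Python) =====
-- def do_stuff(a,b,c):
--   result = 0
--   for i in range(a):
--       if i % 2 == 0:
--           result += b
--       else:
--           result += c
--   return result
-- ===== SOURCE B (Python) =====
-- def do_stuff(a, b, c):
--     # closed form: even indices (count (a+1)//2) contribute b, odd (count a//2) contribute c
--     n = max(a, 0)
--     return ((n + 1) // 2) * b + (n // 2) * c
-- ===== Notes on version B (the rewrite author's own statement) =====
-- stated objective: faster
-- what changed: Replaced the O(a) loop over range(a) with the closed form ((n+1)//2)*b + (n//2)*c where n = max(a,0), counting even and odd indices directly.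
import Mathlib
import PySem

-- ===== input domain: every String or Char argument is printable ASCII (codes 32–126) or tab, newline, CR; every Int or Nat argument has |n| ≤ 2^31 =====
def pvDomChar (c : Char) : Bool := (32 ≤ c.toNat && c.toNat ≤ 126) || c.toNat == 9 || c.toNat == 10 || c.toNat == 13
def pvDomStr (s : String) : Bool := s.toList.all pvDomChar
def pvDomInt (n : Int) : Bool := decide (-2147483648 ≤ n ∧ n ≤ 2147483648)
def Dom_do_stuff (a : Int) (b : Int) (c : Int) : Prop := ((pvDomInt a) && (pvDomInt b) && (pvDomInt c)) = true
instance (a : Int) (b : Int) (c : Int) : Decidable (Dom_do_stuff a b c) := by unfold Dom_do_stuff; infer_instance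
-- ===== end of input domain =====

-- B replaces A's O(a) loop with the O(1) closed form ((n+1)//2)*b + (n//2)*c, n = max(a,0).

-- ===== PORT A =====
def do_stuff (a : Int) (b : Int) (c : Int) : Int :=
  (PySem.List.pyRange 0 a 1).foldl
    (fun result i => if PySem.Int.mod i 2 = 0 then result + b else result + c) 0

-- ===== PORT B =====
def do_stuff_alt (a : Int) (b : Int) (c : Int) : Int :=
  let n := max a 0
  PySem.Int.floordiv (n + 1) 2 * b + PySem.Int.floordiv n 2 * c

-- ===== PRECONDITION & SPEC =====
def Spec_do_stuff (a : Int) (b : Int) (c : Int) (out : Int) : Prop := out = do_stuff_alt a b c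
instance (a : Int) (b : Int) (c : Int) (out : Int) : Decidable (Spec_do_stuff a b c out) := by unfold Spec_do_stuff; infer_instance

-- ===== CLAIM (what is proved, stated in full; the proofs are below) =====
def Claim_equal_do_stuff : Prop := ∀ (a : Int) (b : Int) (c : Int), Dom_do_stuff a b c → Spec_do_stuff a b c (do_stuff a b c)

-- ===== LEMMAS AND PROOFS =====

-- loop over range(0, n) with any accumulator start, n a natural number
theorem do_stuff_loop (b c : Int) (n : Nat) :
    (PySem.List.pyRange 0 (n : Int) 1).foldl
      (fun result i => if PySem.Int.mod i 2 = 0 then result + b else result + c) 0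
    = (((n : Int) + 1) / 2) * b + ((n : Int) / 2) * c := by
  induction n with
  | zero => simp [PySem.List.pyRange_one_eq_nil]
  | succ m ih =>
      rw [show ((m + 1 : Nat) : Int) = (m : Int) + 1 by push_cast; ring,
        PySem.List.pyRange_one_succ_right (by positivity), List.foldl_append, ih]
      simp only [List.foldl_cons, List.foldl_nil]
      rw [PySem.Int.mod_eq_emod_of_pos (by norm_num)]
      split_ifs with h
      · have h1 : ((m : Int) + 1 + 1) / 2 = ((m : Int) + 1) / 2 + 1 := by omega
        have h2 : ((m : Int) + 1) / 2 = (m : Int) / 2 := by omega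
        rw [h1, h2]; ring
      · have h1 : ((m : Int) + 1 + 1) / 2 = ((m : Int) + 1) / 2 := by omega
        have h2 : ((m : Int) + 1) / 2 = (m : Int) / 2 + 1 := by omega
        rw [h1, h2]; ring

theorem do_stuff_eq (a b c : Int) : do_stuff a b c = do_stuff_alt a b c := by
  unfold do_stuff do_stuff_alt
  rcases le_or_gt a 0 with h | h
  · rw [PySem.List.pyRange_one_eq_nil h]
    have hm : max a 0 = 0 := by omega
    simp [hm, PySem.Int.floordiv]
  · obtain ⟨n, rfl⟩ : ∃ n : Nat, a = (n : Int) := ⟨a.toNat, by omega⟩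
    have hm : max (n : Int) 0 = (n : Int) := by omega
    rw [do_stuff_loop, hm]
    simp only [PySem.Int.floordiv_eq_ediv_of_pos (by norm_num : (0:Int) < 2)]

-- ===== VERDICT (by name: the statement is the Claim_ definition above) =====
theorem do_stuff_spec : Claim_equal_do_stuff := by
  intro a b c _
  exact do_stuff_eq a b c
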